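-- pv_equiv track=rewrite | github.com/cherenkov-plenoscope/queue_map_reduce | queue_map_reduce/tools.py | assign_jobs_to_chunks
-- ===== SOURCE A (Python) =====
-- import math
--
-- def assign_jobs_to_chunks(num_jobs, num_chunks):
--     """
--     When you have too many jobs for your parallel processing queue this
--     function chunks multiple jobs into fewer chunks.
--
--     Parameters
--     ----------
--     num_jobs : int
--         Number of jobs.
--     num_chunks : int (optional)
--         The maximum number of chunks. Your jobs will be spread over
--         these many chunks. If None, each chunk contains a single job.
--
--     Returns
--     -------
--         A list of chunks where each chunk is a list of job-indices.
--         The lengths of the list of chunks is <= num_chunks.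
--     """
--     if num_chunks is None:
--         num_jobs_in_chunk = 1
--     else:
--         assert num_chunks > 0
--         num_jobs_in_chunk = int(math.ceil(num_jobs / num_chunks))
--
--     chunks = []
--     current_chunk = []
--     for j in range(num_jobs):
--         if len(current_chunk) < num_jobs_in_chunk:
--             current_chunk.append(j)
--         else:
--             chunks.append(current_chunk)
--             current_chunk = []
--             current_chunk.append(j)
--     if len(current_chunk):
--         chunks.append(current_chunk)
--     return chunks
-- ===== SOURCE B (Python) =====
-- import math
--
--
-- def assign_jobs_to_chunks(num_jobs, num_chunks):
--     if num_chunks is None: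
--         num_jobs_in_chunk = 1
--     else:
--         assert num_chunks > 0
--         num_jobs_in_chunk = int(math.ceil(num_jobs / num_chunks))
--     if num_jobs <= 0:
--         return []
--     return [
--         list(range(i, min(i + num_jobs_in_chunk, num_jobs)))
--         for i in range(0, num_jobs, num_jobs_in_chunk)
--     ]
-- ===== Notes on version B (the rewrite author's own statement) =====
-- stated objective: idiomatic
-- what changed: B replaces A's per-index accumulator loop with a full/not-full branch by a comprehension that strides over the indices in steps of the chunk size and slices each chunk directly from a range.
import Mathlib
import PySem

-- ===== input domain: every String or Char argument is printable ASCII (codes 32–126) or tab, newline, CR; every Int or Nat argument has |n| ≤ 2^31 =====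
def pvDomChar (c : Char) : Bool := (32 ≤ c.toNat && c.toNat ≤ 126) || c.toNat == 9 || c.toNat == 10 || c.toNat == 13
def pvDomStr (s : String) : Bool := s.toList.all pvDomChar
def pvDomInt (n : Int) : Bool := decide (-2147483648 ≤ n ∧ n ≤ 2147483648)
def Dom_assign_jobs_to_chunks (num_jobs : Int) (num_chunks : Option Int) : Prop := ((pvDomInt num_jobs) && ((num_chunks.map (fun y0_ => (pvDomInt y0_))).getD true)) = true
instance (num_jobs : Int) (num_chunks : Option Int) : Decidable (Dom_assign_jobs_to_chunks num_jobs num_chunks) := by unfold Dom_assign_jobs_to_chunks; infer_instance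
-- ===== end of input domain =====

-- B replaces A's per-index accumulator loop (full/not-full branch) by a comprehension striding
-- over the indices in steps of the chunk size, slicing each chunk directly from a range.

-- ===== PORT A =====

-- int(math.ceil(num_jobs / num_chunks)) as ceiling division -((-a) // b);
-- exact on the stated domain (|num_jobs| ≤ 2^31, so the float quotient rounds to the same ceiling)
def pvCeilSize (num_jobs : Int) (num_chunks : Option Int) : Int :=
  match num_chunks with
  | none => 1
  | some c => -(PySem.Int.floordiv (-num_jobs) c)

-- one iteration of A's for-loop: state = (chunks, current_chunk)
def pvStepA (s : Int) (st : List (List Int) × List Int) (j : Int) : List (List Int) × List Int :=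
  if (st.2.length : Int) < s then (st.1, st.2 ++ [j]) else (st.1 ++ [st.2], [j])

-- the final 'if len(current_chunk): chunks.append(current_chunk)'
def pvFinishA (st : List (List Int) × List Int) : List (List Int) :=
  if st.2.length ≠ 0 then st.1 ++ [st.2] else st.1

def assign_jobs_to_chunks (num_jobs : Int) (num_chunks : Option Int) : List (List Int) :=
  let s := pvCeilSize num_jobs num_chunks
  pvFinishA ((PySem.List.pyRange 0 num_jobs 1).foldl (pvStepA s) ([], []))

-- ===== PORT B =====

def assign_jobs_to_chunks_alt (num_jobs : Int) (num_chunks : Option Int) : List (List Int) :=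
  let s := pvCeilSize num_jobs num_chunks
  if num_jobs ≤ 0 then []
  else (PySem.List.pyRange 0 num_jobs s).map
        (fun i => PySem.List.pyRange i (min (i + s) num_jobs) 1)

-- ===== PRECONDITION & SPEC =====
-- Pre_ excludes num_chunks = some c with c ≤ 0, where A's (and B's) 'assert num_chunks > 0' raises AssertionError.
def Pre_assign_jobs_to_chunks (num_jobs : Int) (num_chunks : Option Int) : Prop :=
  0 < num_chunks.getD 1
instance (num_jobs : Int) (num_chunks : Option Int) : Decidable (Pre_assign_jobs_to_chunks num_jobs num_chunks) := by unfold Pre_assign_jobs_to_chunks; infer_instance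

def pvWitness_assign_jobs_to_chunks : Int × Option Int := (7, some 3)

def Spec_assign_jobs_to_chunks (num_jobs : Int) (num_chunks : Option Int) (out : List (List Int)) : Prop := out = assign_jobs_to_chunks_alt num_jobs num_chunks
instance (num_jobs : Int) (num_chunks : Option Int) (out : List (List Int)) : Decidable (Spec_assign_jobs_to_chunks num_jobs num_chunks out) := by unfold Spec_assign_jobs_to_chunks; infer_instance

-- ===== CLAIM (what is proved, stated in full; the proofs are below) =====
def Claim_equal_assign_jobs_to_chunks : Prop := ∀ (num_jobs : Int) (num_chunks : Option Int), Dom_assign_jobs_to_chunks num_jobs num_chunks → Pre_assign_jobs_to_chunks num_jobs num_chunks → Spec_assign_jobs_to_chunks num_jobs num_chunks (assign_jobs_to_chunks num_jobs num_chunks)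

-- ===== LEMMAS AND PROOFS =====

-- common characterisation: chunks of size r+1
def pvChunks (r : Nat) : List Int → List (List Int)
  | [] => []
  | x :: xs => (x :: xs.take r) :: pvChunks r (xs.drop r)
termination_by l => l.length
decreasing_by simp

lemma pvChunks_nil (r : Nat) : pvChunks r [] = [] := by
  rw [pvChunks.eq_def]

lemma pvChunks_cons (r : Nat) (x : Int) (xs : List Int) :
    pvChunks r (x :: xs) = (x :: xs.take r) :: pvChunks r (xs.drop r) := by
  rw [pvChunks.eq_def]

lemma foldA_fill (r : Nat) (l : List Int) : ∀ (chunks : List (List Int)) (cur : List Int),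
    1 ≤ cur.length → cur.length ≤ r + 1 →
    pvFinishA (l.foldl (pvStepA ((r : Int) + 1)) (chunks, cur)) =
      chunks ++ (cur ++ l.take (r + 1 - cur.length)) :: pvChunks r (l.drop (r + 1 - cur.length)) := by
  induction l with
  | nil =>
    intro chunks cur h1 h2
    have hne : cur.length ≠ 0 := by omega
    simp [pvFinishA, hne, pvChunks_nil]
  | cons j rest ih =>
    intro chunks cur h1 h2
    by_cases hlt : cur.length < r + 1
    · have hstep : pvStepA ((r : Int) + 1) (chunks, cur) j = (chunks, cur ++ [j]) := by
        simp [pvStepA]; omega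
      rw [List.foldl_cons, hstep, ih chunks (cur ++ [j]) (by simp) (by simp; omega)]
      have htake : (j :: rest).take (r + 1 - cur.length) = j :: rest.take (r - cur.length) := by
        have : r + 1 - cur.length = (r - cur.length) + 1 := by omega
        rw [this, List.take_succ_cons]
      have hdrop : (j :: rest).drop (r + 1 - cur.length) = rest.drop (r - cur.length) := by
        have : r + 1 - cur.length = (r - cur.length) + 1 := by omega
        rw [this, List.drop_succ_cons]
      have hlen : cur.length + 1 ≤ r + 1 := by omega
      rw [htake, hdrop]
      simp only [List.length_append, List.length_cons, List.length_nil, Nat.zero_add]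
      have he : r + 1 - (cur.length + 1) = r - cur.length := by omega
      rw [he]
      simp
    · have hcur : cur.length = r + 1 := by omega
      have hstep : pvStepA ((r : Int) + 1) (chunks, cur) j = (chunks ++ [cur], [j]) := by
        simp [pvStepA]; omega
      rw [List.foldl_cons, hstep, ih (chunks ++ [cur]) [j] (by simp) (by simp)]
      simp [hcur, pvChunks_cons]

lemma foldA_eq (r : Nat) (l : List Int) :
    pvFinishA (l.foldl (pvStepA ((r : Int) + 1)) ([], [])) = pvChunks r l := by
  cases l with
  | nil => simp [pvFinishA, pvChunks_nil]
  | cons j rest =>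
    have hstep : pvStepA ((r : Int) + 1) ([], []) j = ([], [j]) := by
      simp [pvStepA]
    rw [List.foldl_cons, hstep, foldA_fill r rest [] [j] (by simp) (by simp)]
    simp [pvChunks_cons]

lemma pyRange_pos_cons (a b s : Int) (hs : 0 < s) (hab : a < b) :
    PySem.List.pyRange a b s = a :: PySem.List.pyRange (a + s) b s := by
  rw [PySem.List.pyRange_of_pos a b hs, PySem.List.pyRange_of_pos (a + s) b hs]
  have hc1 : (if a < b then ((b - a + s - 1) / s).toNat else 0) =
      (if a + s < b then ((b - (a + s) + s - 1) / s).toNat else 0) + 1 := by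
    rw [if_pos hab]
    by_cases h2 : a + s < b
    · rw [if_pos h2]
      have : b - a + s - 1 = (b - (a + s) + s - 1) + 1 * s := by ring
      rw [this, Int.add_mul_ediv_right _ _ (by omega : s ≠ 0)]
      have hnn : 0 ≤ (b - (a + s) + s - 1) / s := Int.ediv_nonneg (by omega) (by omega)
      omega
    · rw [if_neg h2]
      have hlow : (1:Int) * s ≤ b - a + s - 1 := by omega
      have hhigh : b - a + s - 1 < 2 * s := by omega
      have : (b - a + s - 1) / s = 1 := by
        have h1 : 1 ≤ (b - a + s - 1) / s := Int.le_ediv_iff_mul_le hs |>.mpr hlow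
        have h2' : (b - a + s - 1) / s < 2 := Int.ediv_lt_iff_lt_mul hs |>.mpr (by linarith)
        omega
      simp [this]
  rw [hc1, List.range_succ_eq_map]
  simp [List.map_map, Function.comp]
  intro k _
  ring

lemma pyRange_one_take (a b : Int) (k : Nat) :
    (PySem.List.pyRange a b 1).take k = PySem.List.pyRange a (min (a + k) b) 1 := by
  rw [PySem.List.pyRange_one, PySem.List.pyRange_one, ← List.map_take, List.take_range]
  congr 1
  congr 1
  omega

lemma pyRange_one_drop (a b : Int) (k : Nat) :
    (PySem.List.pyRange a b 1).drop k = PySem.List.pyRange (a + k) b 1 := by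
  rw [PySem.List.pyRange_one, PySem.List.pyRange_one, ← List.map_drop]
  by_cases h : k ≤ (b - a).toNat
  · have hsplit : (b - a).toNat = k + (b - (a + k)).toNat := by omega
    rw [hsplit, List.range_add]
    have hd : (List.range k ++ List.map (fun x => k + x) (List.range (b - (a + k)).toNat)).drop k =
        List.map (fun x => k + x) (List.range (b - (a + k)).toNat) := by
      simp
    rw [hd, List.map_map]
    apply List.map_congr_left
    intro x _
    simp [Function.comp]
    ring
  · have h1 : (b - (a + k)).toNat = 0 := by omega
    rw [List.drop_eq_nil_of_le (by simp; omega), h1]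
    simp

lemma B_eq (r : Nat) (n : Int) : ∀ (i : Int),
    (PySem.List.pyRange i n ((r : Int) + 1)).map
        (fun x => PySem.List.pyRange x (min (x + ((r : Int) + 1)) n) 1) =
      pvChunks r (PySem.List.pyRange i n 1) := by
  intro i
  by_cases h : i < n
  · have hs : (0:Int) < (r : Int) + 1 := by omega
    rw [pyRange_pos_cons i n _ hs h, PySem.List.pyRange_one_cons h]
    rw [pvChunks_cons]
    have htail := B_eq r n (i + ((r : Int) + 1))
    rw [List.map_cons, htail]
    have hdrop : (PySem.List.pyRange (i + 1) n 1).drop r = PySem.List.pyRange (i + ((r : Int) + 1)) n 1 := by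
      rw [pyRange_one_drop]
      congr 1
      ring
    have htake : (PySem.List.pyRange (i + 1) n 1).take r = PySem.List.pyRange (i + 1) (min (i + 1 + r) n) 1 := by
      rw [pyRange_one_take]
    rw [hdrop, htake]
    have hhead : PySem.List.pyRange i (min (i + ((r : Int) + 1)) n) 1 =
        i :: PySem.List.pyRange (i + 1) (min (i + 1 + r) n) 1 := by
      have : min (i + ((r : Int) + 1)) n = min (i + 1 + (r : Int)) n := by
        congr 1; ring
      rw [this, PySem.List.pyRange_one_cons (by omega)]
    rw [hhead]
  · rw [PySem.List.pyRange_one_eq_nil (by omega)]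
    have : PySem.List.pyRange i n ((r : Int) + 1) = [] := by
      rw [PySem.List.pyRange_of_pos _ _ (by omega : (0:Int) < (r:Int)+1)]
      simp [if_neg h]
    simp [this, pvChunks_nil]
termination_by i => (n - i).toNat
decreasing_by omega

lemma size_pos (num_jobs : Int) (num_chunks : Option Int)
    (hpre : 0 < num_chunks.getD 1) (hnj : 0 < num_jobs) :
    0 < pvCeilSize num_jobs num_chunks := by
  cases num_chunks with
  | none => simp [pvCeilSize]
  | some c =>
    simp at hpre
    simp only [pvCeilSize]
    have h := (PySem.Int.floordiv_lt_iff_lt_mul (a := -num_jobs) (q := 0) hpre).mpr (by omega)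
    omega

-- ===== VERDICT (by name: the statement is the Claim_ definition above) =====
theorem assign_jobs_to_chunks_spec : Claim_equal_assign_jobs_to_chunks := by
  intro num_jobs num_chunks _hdom hpre
  unfold Spec_assign_jobs_to_chunks assign_jobs_to_chunks assign_jobs_to_chunks_alt
  by_cases hnj : num_jobs ≤ 0
  · rw [if_pos hnj, PySem.List.pyRange_one_eq_nil (by omega)]
    simp [pvFinishA]
  · rw [if_neg hnj]
    have hs := size_pos num_jobs num_chunks hpre (by omega)
    set s := pvCeilSize num_jobs num_chunks with hsdef
    obtain ⟨r, hr⟩ : ∃ r : Nat, s = (r : Int) + 1 := ⟨(s - 1).toNat, by omega⟩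
    rw [hr]
    show pvFinishA _ = _
    rw [foldA_eq r (PySem.List.pyRange 0 num_jobs 1), B_eq r num_jobs 0]
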